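-- pv_equiv track=rewrite | github.com/HRG-Lab/Vector_Modulator_Control | ps_control/near_field_test.py | generate_voltage_codebook
-- ===== SOURCE A (Python) =====
-- from itertools import product
--
-- def generate_voltage_codebook(antenna_phase_dict,voltage_dict_list):
--     num_antennas = len(voltage_dict_list)
--     keys = sorted(antenna_phase_dict.keys())
--     new_key_combinations = sorted(product(keys,repeat=num_antennas))
--
--     new_codeword_dict = {}
--     for key_combo in new_key_combinations:
--
--         # Generate next full codeword
--         next_codeword = ''
--         for key in key_combo:
--             next_codeword += key
--
--         next_voltage_list = []
--         for i in range(num_antennas):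
--             key = key_combo[i]
--             if key in voltage_dict_list[i]:
--                 next_voltage_list.append(voltage_dict_list[i][key])
--             else:
--                 break
--
--         if len(next_voltage_list) == num_antennas:
--             new_codeword_dict[next_codeword] = next_voltage_list
--     # for voltage_dict in voltage_dict_list:
--
--     return new_codeword_dict
-- ===== SOURCE B (Python) =====
-- def generate_voltage_codebook(antenna_phase_dict, voltage_dict_list):
--     # Incremental product with per-position pruning instead of filtering the full product.
--     partials = [("", [])]
--     for voltage_dict in voltage_dict_list:
--         valid_keys = [k for k in sorted(antenna_phase_dict) if k in voltage_dict]
--         partials = [(codeword + k, voltages + [voltage_dict[k]])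
--                     for codeword, voltages in partials
--                     for k in valid_keys]
--     return dict(partials)
-- ===== Notes on version B (the rewrite author's own statement) =====
-- stated objective: alternative
-- what changed: B replaces A's enumerate-the-full-sorted-product-then-filter-each-combo scan by an incremental per-antenna product: it prunes each position to its valid sorted keys first and extends a working list of (codeword, voltage-list) partials position by position, so invalid combinations are never generated.
import Mathlib
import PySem

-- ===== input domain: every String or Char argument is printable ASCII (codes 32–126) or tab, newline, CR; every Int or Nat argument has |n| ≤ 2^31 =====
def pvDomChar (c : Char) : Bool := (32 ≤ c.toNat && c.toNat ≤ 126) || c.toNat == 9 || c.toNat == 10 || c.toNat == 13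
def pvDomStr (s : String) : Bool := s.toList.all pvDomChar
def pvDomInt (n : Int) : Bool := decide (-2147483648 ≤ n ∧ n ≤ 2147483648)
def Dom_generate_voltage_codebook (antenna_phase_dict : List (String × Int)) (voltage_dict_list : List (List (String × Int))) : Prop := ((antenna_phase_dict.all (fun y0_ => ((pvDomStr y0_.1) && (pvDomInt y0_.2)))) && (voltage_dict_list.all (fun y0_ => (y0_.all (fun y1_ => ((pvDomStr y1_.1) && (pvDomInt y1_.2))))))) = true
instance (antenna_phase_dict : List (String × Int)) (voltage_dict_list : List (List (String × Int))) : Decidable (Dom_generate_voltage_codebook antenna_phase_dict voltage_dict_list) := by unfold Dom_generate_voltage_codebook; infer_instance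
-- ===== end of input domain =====

-- B replaces A's filter-the-full-product scan by an incremental per-position product over pre-pruned key lists (alternative decomposition; same results, dicts compared as built in insertion order).

-- ===== PORT A =====
-- itertools.product(keys, repeat=n), ported by hand (exact: lexicographic order, leftmost slowest)
def pvProdRepeat (keys : List String) : Nat → List (List String)
  | 0 => [[]]
  | n + 1 => keys.flatMap (fun k => (pvProdRepeat keys n).map (fun t => k :: t))

-- the 'for i in range(num_antennas): … else break' loop building next_voltage_list (exact: break = stop, return acc)
def pvVoltLoop (voltage_dict_list : List (List (String × Int))) (key_combo : List String)
    (num_antennas : Nat) (i : Nat) (acc : List Int) : List Int :=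
  if _h : i < num_antennas then
    let key := PySem.List.pyGetD key_combo (i : Int) ""
    let d := PySem.Dict.ofList (PySem.List.pyGetD voltage_dict_list (i : Int) [])
    if d.contains key then
      pvVoltLoop voltage_dict_list key_combo num_antennas (i + 1) (acc ++ [d.getD key 0])
    else acc
  else acc
termination_by num_antennas - i

def generate_voltage_codebook (antenna_phase_dict : List (String × Int)) (voltage_dict_list : List (List (String × Int))) : List (String × List Int) :=
  let num_antennas := voltage_dict_list.length
  let keys := PySem.List.sorted (PySem.Dict.keys (PySem.Dict.ofList antenna_phase_dict)) (fun x => x) false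
  -- Python's sorted on the product, ported as the stable merge sort by '<' (exact: Python's
  -- sorted is a stable sort comparing with '<'; same result, evaluable on large products)
  let new_key_combinations := (pvProdRepeat keys num_antennas).mergeSort (fun a b => !decide (b < a))
  let new_codeword_dict := new_key_combinations.foldl (fun d key_combo =>
      let next_codeword := key_combo.foldl (fun s k => s ++ k) ""
      let next_voltage_list := pvVoltLoop voltage_dict_list key_combo num_antennas 0 []
      if next_voltage_list.length = num_antennas then d.insert next_codeword next_voltage_list else d)
    PySem.Dict.empty
  new_codeword_dict.items

-- ===== PORT B =====
def generate_voltage_codebook_alt (antenna_phase_dict : List (String × Int)) (voltage_dict_list : List (List (String × Int))) : List (String × List Int) :=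
  let partials := voltage_dict_list.foldl (fun ps l =>
      let vd := PySem.Dict.ofList l
      let valid_keys := (PySem.List.sorted (PySem.Dict.keys (PySem.Dict.ofList antenna_phase_dict)) (fun x => x) false).filter (fun k => vd.contains k)
      ps.flatMap (fun p => valid_keys.map (fun k => (p.1 ++ k, p.2 ++ [vd.getD k 0]))))
    [("", [])]
  (PySem.Dict.ofList partials).items

-- ===== PRECONDITION & SPEC =====
def Spec_generate_voltage_codebook (antenna_phase_dict : List (String × Int)) (voltage_dict_list : List (List (String × Int))) (out : List (String × List Int)) : Prop := out = generate_voltage_codebook_alt antenna_phase_dict voltage_dict_list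
instance (antenna_phase_dict : List (String × Int)) (voltage_dict_list : List (List (String × Int))) (out : List (String × List Int)) : Decidable (Spec_generate_voltage_codebook antenna_phase_dict voltage_dict_list out) := by unfold Spec_generate_voltage_codebook; infer_instance

-- ===== CLAIM (what is proved, stated in full; the proofs are below) =====
def Claim_equal_generate_voltage_codebook : Prop := ∀ (antenna_phase_dict : List (String × Int)) (voltage_dict_list : List (List (String × Int))), Dom_generate_voltage_codebook antenna_phase_dict voltage_dict_list → Spec_generate_voltage_codebook antenna_phase_dict voltage_dict_list (generate_voltage_codebook antenna_phase_dict voltage_dict_list)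

-- ===== LEMMAS AND PROOFS =====

-- the per-combo voltage list, structurally (what pvVoltLoop computes from i = 0)
def pvVoltTail : List (List (String × Int)) → List String → List Int
  | [], _ => []
  | _ :: _, [] => []
  | l :: rest, k :: ks =>
    let vd := PySem.Dict.ofList l
    if vd.contains k then vd.getD k 0 :: pvVoltTail rest ks else []

-- the surviving (codeword, voltages) pair of one combo, or none
def pvStep (voltage_dict_list : List (List (String × Int))) (c : List String) : Option (String × List Int) :=
  let vs := pvVoltTail voltage_dict_list c
  if vs.length = voltage_dict_list.length then some (c.foldl (fun s k => s ++ k) "", vs) else none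

-- the pruned incremental product (B's partials), structurally
def pvPairs (S : List String) : List (List (String × Int)) → List (String × List Int)
  | [] => [("", [])]
  | l :: rest =>
    let vd := PySem.Dict.ofList l
    (S.filter (fun k => vd.contains k)).flatMap
      (fun k => (pvPairs S rest).map (fun q => (k ++ q.1, vd.getD k 0 :: q.2)))

lemma pvConcat_foldl (c : List String) : ∀ s : String, c.foldl (fun a k => a ++ k) s = s ++ c.foldl (fun a k => a ++ k) "" := by
  induction c with
  | nil => intro s; simp [List.foldl]
  | cons k t ih =>
    intro s
    simp only [List.foldl]
    rw [ih (s ++ k), ih ("" ++ k), String.empty_append, String.append_assoc]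

lemma pvProdRepeat_length (S : List String) (n : Nat) : ∀ c ∈ pvProdRepeat S n, c.length = n := by
  induction n with
  | zero => intro c hc; simp [pvProdRepeat] at hc; simp [hc]
  | succ n ih =>
    intro c hc
    simp only [pvProdRepeat, List.mem_flatMap, List.mem_map] at hc
    obtain ⟨k, -, t, ht, rfl⟩ := hc
    simp [ih t ht]

lemma pvProdRepeat_pairwise (S : List String) (hS : S.Pairwise (· < ·)) (n : Nat) :
    (pvProdRepeat S n).Pairwise (· < ·) := by
  induction n with
  | zero => simp [pvProdRepeat]
  | succ n ih =>
    rw [pvProdRepeat, List.pairwise_flatMap]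
    constructor
    · intro k _
      exact (List.pairwise_map).mpr (ih.imp (fun h => List.Lex.cons h))
    · refine hS.imp ?_
      intro a b hab x hx y hy
      simp only [List.mem_map] at hx hy
      obtain ⟨t, -, rfl⟩ := hx
      obtain ⟨t', -, rfl⟩ := hy
      exact List.Lex.rel hab

lemma pvVoltLoop_eq (vdl : List (List (String × Int))) (c : List String) (hc : c.length = vdl.length) :
    ∀ i acc, pvVoltLoop vdl c vdl.length i acc = acc ++ pvVoltTail (vdl.drop i) (c.drop i) := by
  have main : ∀ m i acc, vdl.length - i = m →
      pvVoltLoop vdl c vdl.length i acc = acc ++ pvVoltTail (vdl.drop i) (c.drop i) := by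
    intro m
    induction m with
    | zero =>
      intro i acc hm
      have hge : vdl.length ≤ i := by omega
      rw [pvVoltLoop]
      simp [Nat.not_lt.mpr hge, List.drop_eq_nil_of_le hge, pvVoltTail]
    | succ m ih =>
      intro i acc hm
      have hi : i < vdl.length := by omega
      have hic : i < c.length := by omega
      rw [pvVoltLoop]
      simp only [hi, dif_pos]
      rw [PySem.List.pyGetD_natCast c i "", PySem.List.pyGetD_natCast vdl i []]
      rw [List.getD_eq_getElem c "" hic, List.getD_eq_getElem vdl [] hi]
      rw [List.drop_eq_getElem_cons hi, List.drop_eq_getElem_cons hic, pvVoltTail]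
      split_ifs with hcon
      · rw [ih (i + 1) _ (by omega)]
        simp
      · simp
  intro i acc
  exact main (vdl.length - i) i acc rfl

lemma pvFilterMap_optionMap {α β γ : Type} (l : List α) (h : α → Option β) (g : β → γ) :
    l.filterMap (fun a => (h a).map g) = (l.filterMap h).map g := by
  induction l with
  | nil => simp
  | cons a t ih => cases hha : h a <;> simp [hha, ih]

lemma pvFlatMap_if {α β : Type} (l : List α) (p : α → Bool) (F : α → List β) :
    (l.flatMap (fun a => if p a then F a else [])) = (l.filter p).flatMap F := by
  induction l with
  | nil => simp
  | cons a t ih => by_cases hpa : p a <;> simp [hpa, ih]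

lemma pvFilterMap_prod (S : List String) (vdl : List (List (String × Int))) :
    (pvProdRepeat S vdl.length).filterMap (pvStep vdl) = pvPairs S vdl := by
  induction vdl with
  | nil => simp [pvProdRepeat, pvStep, pvVoltTail, pvPairs]
  | cons l rest ih =>
    have hcons : ∀ (k : String) (c : List String), pvStep (l :: rest) (k :: c) =
        if (PySem.Dict.ofList l).contains k then
          (pvStep rest c).map (fun pr => (k ++ pr.1, (PySem.Dict.ofList l).getD k 0 :: pr.2))
        else none := by
      intro k c
      simp only [pvStep, pvVoltTail]
      by_cases hcon : (PySem.Dict.ofList l).contains k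
      · simp only [hcon, if_true, List.foldl_cons]
        rw [pvConcat_foldl c ("" ++ k), String.empty_append]
        by_cases hlen : (pvVoltTail rest c).length = rest.length
        · simp [hlen]
        · simp [hlen]
      · simp [hcon]
    show (pvProdRepeat S (rest.length + 1)).filterMap (pvStep (l :: rest)) = _
    rw [pvProdRepeat, List.filterMap_flatMap]
    have hbody : ∀ k ∈ S, ((pvProdRepeat S rest.length).map (fun t => k :: t)).filterMap (pvStep (l :: rest))
        = if (PySem.Dict.ofList l).contains k then
            ((pvProdRepeat S rest.length).filterMap (pvStep rest)).map
              (fun pr => (k ++ pr.1, (PySem.Dict.ofList l).getD k 0 :: pr.2))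
          else [] := by
      intro k _
      rw [List.filterMap_map]
      by_cases hcon : (PySem.Dict.ofList l).contains k
      · simp only [Function.comp_def, hcons, hcon, if_true]
        exact pvFilterMap_optionMap _ _ _
      · simp [hcons, hcon]
    rw [List.flatMap_congr hbody, pvFlatMap_if, ih]
    rfl

lemma pvFoldl_if_insert (combos : List (List String)) (vdl : List (List (String × Int)))
    (hlen : ∀ c ∈ combos, c.length = vdl.length) (d0 : PySem.Dict String (List Int)) :
    combos.foldl (fun d c =>
      if (pvVoltLoop vdl c vdl.length 0 []).length = vdl.length then
        d.insert (c.foldl (fun s k => s ++ k) "") (pvVoltLoop vdl c vdl.length 0 []) else d) d0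
    = (combos.filterMap (pvStep vdl)).foldl (fun d pr => d.insert pr.1 pr.2) d0 := by
  induction combos generalizing d0 with
  | nil => simp
  | cons c t ih =>
    have hc : c.length = vdl.length := hlen c (by simp)
    have hv : pvVoltLoop vdl c vdl.length 0 [] = pvVoltTail vdl c := by
      simpa using pvVoltLoop_eq vdl c hc 0 []
    rw [List.foldl_cons, List.filterMap_cons]
    have ht := fun c hm => hlen c (List.mem_cons_of_mem _ hm)
    by_cases hcnd : (pvVoltTail vdl c).length = vdl.length
    · have hstep : pvStep vdl c = some (c.foldl (fun s k => s ++ k) "", pvVoltTail vdl c) := by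
        simp [pvStep, hcnd]
      rw [hstep]
      simp only [hv, hcnd, if_true]
      exact ih ht _
    · have hstep : pvStep vdl c = none := by simp [pvStep, hcnd]
      rw [hstep]
      simp only [hv, hcnd, if_false]
      exact ih ht _

lemma pvUpdate_eq_foldl {κ ν : Type} [BEq κ] (l : List (κ × ν)) (d : PySem.Dict κ ν) :
    d.update l = l.foldl (fun d pr => d.insert pr.1 pr.2) d := by
  induction l generalizing d with
  | nil => simp [PySem.Dict.update]
  | cons p t ih => simp [PySem.Dict.update] at ih ⊢

lemma pvFoldPartials (S : List String) (vdl : List (List (String × Int))) :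
    ∀ ps : List (String × List Int),
      vdl.foldl (fun ps l =>
        ps.flatMap (fun p => ((S.filter (fun k => (PySem.Dict.ofList l).contains k)).map
          (fun k => (p.1 ++ k, p.2 ++ [(PySem.Dict.ofList l).getD k 0]))))) ps
      = ps.flatMap (fun p => (pvPairs S vdl).map (fun q => (p.1 ++ q.1, p.2 ++ q.2))) := by
  induction vdl with
  | nil =>
    intro ps
    simp [pvPairs]
  | cons l rest ih =>
    intro ps
    rw [List.foldl_cons, ih]
    rw [pvPairs]
    simp only [List.flatMap_assoc, List.flatMap_map, List.map_flatMap, List.map_map, Function.comp_def,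
      String.append_assoc, List.append_assoc, List.singleton_append]

-- ===== VERDICT (by name: the statement is the Claim_ definition above) =====
theorem generate_voltage_codebook_spec : Claim_equal_generate_voltage_codebook := by
  intro apd vdl _
  unfold Spec_generate_voltage_codebook generate_voltage_codebook generate_voltage_codebook_alt
  simp only []
  set S := PySem.List.sorted (PySem.Dict.keys (PySem.Dict.ofList apd)) (fun x => x) false with hSdef
  have hnd : S.Nodup := ((PySem.List.sorted_perm _ _ _).nodup_iff).mpr (PySem.Dict.nodup_keys_ofList apd)
  have hle : S.Pairwise (· ≤ ·) := PySem.List.sorted_pairwise _ _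
  have hlt : S.Pairwise (· < ·) := (hle.and hnd).imp (fun h => lt_of_le_of_ne h.1 h.2)
  have hasym : ∀ a b : List String, a < b → ¬ b < a := by
    intro a b hab hba
    exact @Std.Asymm.asymm (List String) (List.Lex (· < ·)) inferInstance a b
      ((List.lt_iff_lex_lt a b).mp hab) ((List.lt_iff_lex_lt b a).mp hba)
  have hsorted : (pvProdRepeat S vdl.length).mergeSort (fun a b => !decide (b < a))
      = pvProdRepeat S vdl.length := by
    refine List.mergeSort_of_pairwise ?_
    refine (pvProdRepeat_pairwise S hlt vdl.length).imp ?_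
    intro a b hab
    simp [hasym a b hab]
  rw [hsorted]
  rw [pvFoldl_if_insert (pvProdRepeat S vdl.length) vdl (pvProdRepeat_length S _) PySem.Dict.empty]
  rw [pvFilterMap_prod]
  rw [pvFoldPartials S vdl [("", [])]]
  have hps : ([("", [])] : List (String × List Int)).flatMap
      (fun p => (pvPairs S vdl).map (fun q => (p.1 ++ q.1, p.2 ++ q.2))) = pvPairs S vdl := by
    simp
  rw [hps]
  have hof : PySem.Dict.ofList (pvPairs S vdl)
      = (pvPairs S vdl).foldl (fun d pr => d.insert pr.1 pr.2) PySem.Dict.empty := by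
    rw [← pvUpdate_eq_foldl]; rfl
  rw [hof]
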